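-- pv_equiv track=rewrite | github.com/gaffery/wish | src/wishapi.py | build_sort_solution
-- ===== SOURCE A (Python) =====
-- import collections
--
-- def build_sort_solution(solution, levels):
--     level_groups = collections.defaultdict(list)
--     for pkg, ver in solution.items():
--         if pkg in levels:
--             lvl, pos = levels.get(pkg)
--             level_groups[lvl].append((pkg, ver, pos))
--     sorted_solution_items = []
--     for lvl in sorted(level_groups.keys()):
--         sorted_layer = sorted(level_groups[lvl], key=lambda x: (x[2], x[0]))
--         sorted_solution_items.extend((pkg, ver) for pkg, ver, _ in sorted_layer)
--     solution = collections.OrderedDict(sorted_solution_items)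
--     return solution
-- ===== SOURCE B (Python) =====
-- import collections
--
--
-- def build_sort_solution(solution, levels):
--     rows = []
--     for pkg, ver in solution.items():
--         if pkg in levels:
--             lvl, pos = levels.get(pkg)
--             rows.append((lvl, pos, pkg, ver))
--     rows.sort(key=lambda r: r[:3])
--     return collections.OrderedDict((pkg, ver) for _, _, pkg, ver in rows)
-- ===== Notes on version B (the rewrite author's own statement) =====
-- stated objective: simpler
-- what changed: Replaces the defaultdict level-grouping plus the per-level sort loop with one flat decorated list sorted once by the composite key (level, position, package).
import Mathlib
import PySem

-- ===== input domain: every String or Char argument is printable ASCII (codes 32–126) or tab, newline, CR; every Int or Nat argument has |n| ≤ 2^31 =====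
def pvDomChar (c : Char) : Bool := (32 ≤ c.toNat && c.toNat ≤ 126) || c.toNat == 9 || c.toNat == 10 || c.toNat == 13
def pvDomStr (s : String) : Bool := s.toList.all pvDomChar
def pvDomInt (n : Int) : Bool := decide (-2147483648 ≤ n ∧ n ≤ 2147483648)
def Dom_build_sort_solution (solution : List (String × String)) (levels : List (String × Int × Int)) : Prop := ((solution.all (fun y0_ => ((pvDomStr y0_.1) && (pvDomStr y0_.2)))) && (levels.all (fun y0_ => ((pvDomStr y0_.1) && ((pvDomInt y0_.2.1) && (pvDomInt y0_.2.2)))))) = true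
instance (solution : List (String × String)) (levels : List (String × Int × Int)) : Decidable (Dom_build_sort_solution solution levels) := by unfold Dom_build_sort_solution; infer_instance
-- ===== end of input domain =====

-- B replaces A's defaultdict level-grouping + per-level sort loop by one flat decorated list
-- sorted once by the composite key (level, position, package); objective: simpler. Equal return value on Pre_.

-- ===== PORT A =====
-- 'if pkg in levels: lvl, pos = levels.get(pkg)' is ported as one match on get? (contains ↔ get?.isSome)
def build_sort_solution (solution : List (String × String)) (levels : List (String × Int × Int)) : List (String × String) :=
  let lv : PySem.Dict String (Int × Int) := PySem.Dict.mk levels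
  let level_groups : PySem.Dict Int (List (String × String × Int)) :=
    solution.foldl (fun d pv =>
      match lv.get? pv.1 with
      | some lp => d.modify lp.1 [] (fun g => g ++ [(pv.1, pv.2, lp.2)])
      | none => d) PySem.Dict.empty
  let sorted_solution_items : List (String × String) :=
    (PySem.List.sorted level_groups.keys (fun x => x)).foldl
      (fun acc l =>
        acc ++ (PySem.List.sorted2 (level_groups.getD l []) (fun x => x.2.2) (fun x => x.1)).map
          (fun x => (x.1, x.2.1))) []
  (PySem.Dict.ofList sorted_solution_items).items

-- ===== PORT B =====
-- Python's 3-tuple sort key r[:3] = (lvl, pos, pkg) compares lexicographically: exactly the ×ₗ order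
-- (Int and String '<' match Python's; PySem.List.sorted is Python's stable sort).
def build_sort_solution_alt (solution : List (String × String)) (levels : List (String × Int × Int)) : List (String × String) :=
  let lv : PySem.Dict String (Int × Int) := PySem.Dict.mk levels
  let rows : List (Int × Int × String × String) :=
    solution.filterMap (fun pv =>
      match lv.get? pv.1 with
      | some lp => some (lp.1, lp.2, pv.1, pv.2)
      | none => none)
  let srt := PySem.List.sorted rows (fun r => toLex (r.1, toLex (r.2.1, r.2.2.1)))
  (PySem.Dict.ofList (srt.map (fun r => (r.2.2.1, r.2.2.2)))).items

-- ===== PRECONDITION & SPEC =====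
-- Pre_ excludes association lists carrying a duplicate key in solution or in levels: both parameters
-- are Python dicts, and a duplicate-key association list does not represent any Python dict input.
def Pre_build_sort_solution (solution : List (String × String)) (levels : List (String × Int × Int)) : Prop :=
  (solution.map Prod.fst).Nodup ∧ (levels.map Prod.fst).Nodup
instance (solution : List (String × String)) (levels : List (String × Int × Int)) : Decidable (Pre_build_sort_solution solution levels) := by unfold Pre_build_sort_solution; infer_instance

def pvWitness_build_sort_solution : (List (String × String)) × (List (String × Int × Int)) :=
  ([("b", "2.0"), ("a", "1.0"), ("c", "3.0")], [("a", (1, 0)), ("b", (0, 2)), ("c", (0, 1))])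

def Spec_build_sort_solution (solution : List (String × String)) (levels : List (String × Int × Int)) (out : List (String × String)) : Prop := out = build_sort_solution_alt solution levels
instance (solution : List (String × String)) (levels : List (String × Int × Int)) (out : List (String × String)) : Decidable (Spec_build_sort_solution solution levels out) := by unfold Spec_build_sort_solution; infer_instance

-- ===== CLAIM (what is proved, stated in full; the proofs are below) =====
def Claim_equal_build_sort_solution : Prop := ∀ (solution : List (String × String)) (levels : List (String × Int × Int)), Dom_build_sort_solution solution levels → Pre_build_sort_solution solution levels → Spec_build_sort_solution solution levels (build_sort_solution solution levels)

-- ===== LEMMAS AND PROOFS =====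

-- the decorated rows both ports are about
def bssRows (solution : List (String × String)) (levels : List (String × Int × Int)) : List (Int × Int × String × String) :=
  solution.filterMap (fun pv =>
    match (PySem.Dict.mk levels).get? pv.1 with
    | some lp => some (lp.1, lp.2, pv.1, pv.2)
    | none => none)

-- composite keys
def bssKpp (r : Int × Int × String × String) : Int ×ₗ String := toLex (r.2.1, r.2.2.1)
def bssKfull (r : Int × Int × String × String) : Int ×ₗ (Int ×ₗ String) := toLex (r.1, toLex (r.2.1, r.2.2.1))

-- the canonical result: sorted distinct levels, within a level sorted by (pos, pkg)
def bssCanon (rows : List (Int × Int × String × String)) : List (Int × Int × String × String) :=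
  (PySem.List.sorted (PySem.Set.ofList (rows.map (·.1))) (fun x => x)).flatMap
    (fun l => PySem.List.sorted (rows.filter (fun r => r.1 == l)) bssKpp)

theorem sorted2_eq_sorted_toLex {α κ₁ κ₂ : Type} [LinearOrder κ₁] [LinearOrder κ₂]
    (xs : List α) (k1 : α → κ₁) (k2 : α → κ₂) :
    PySem.List.sorted2 xs k1 k2 = PySem.List.sorted xs (fun x => toLex (k1 x, k2 x)) := by
  unfold PySem.List.sorted2 PySem.List.sorted
  simp only [Bool.false_eq_true, if_false]
  have h : (fun a b => decide (k1 a < k1 b) || (!decide (k1 b < k1 a) && decide (k2 a < k2 b)))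
      = (fun a b : α => decide (toLex (k1 a, k2 a) < toLex (k1 b, k2 b))) := by
    funext a b
    rcases lt_trichotomy (k1 a) (k1 b) with h | h | h
    · simp [Prod.Lex.toLex_lt_toLex, h, not_lt_of_gt]
    · simp [Prod.Lex.toLex_lt_toLex, h]
    · simp [Prod.Lex.toLex_lt_toLex, h, not_lt_of_gt]
  rw [h]

theorem insertBy_map {α β : Type} (h : α → β) (bef : β → β → Bool) (x : α) (ys : List α) :
    PySem.List.insertBy bef (h x) (ys.map h) = (PySem.List.insertBy (fun a b => bef (h a) (h b)) x ys).map h := by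
  induction ys with
  | nil => simp [PySem.List.insertBy]
  | cons y ys ih =>
    simp only [List.map_cons, PySem.List.insertBy]
    by_cases hb : bef (h x) (h y) <;> simp [hb, ih]

theorem sorted_map_comm {α β κ : Type} [LT κ] [DecidableLT κ] (h : α → β) (xs : List α) (key : β → κ) :
    PySem.List.sorted (xs.map h) key = (PySem.List.sorted xs (fun a => key (h a))).map h := by
  unfold PySem.List.sorted
  simp only [Bool.false_eq_true, if_false]
  suffices H : ∀ acc : List α,
      List.foldl (fun acc x => PySem.List.insertBy (fun a b => decide (key a < key b)) x acc) (acc.map h) (xs.map h)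
      = (List.foldl (fun acc x => PySem.List.insertBy (fun a b => decide (key (h a) < key (h b))) x acc) acc xs).map h by
    simpa using H []
  induction xs with
  | nil => intro acc; simp
  | cons z zs ih =>
    intro acc
    simp only [List.map_cons, List.foldl_cons]
    rw [insertBy_map h (fun a b => decide (key a < key b)) z acc]
    exact ih _

theorem bss_group_fold_eq (levels : List (String × Int × Int)) (solution : List (String × String))
    (d : PySem.Dict Int (List (String × String × Int))) :
    solution.foldl (fun d pv =>
      match (PySem.Dict.mk levels).get? pv.1 with
      | some lp => d.modify lp.1 [] (fun g => g ++ [(pv.1, pv.2, lp.2)])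
      | none => d) d
    = ((bssRows solution levels).map (fun r => (r.1, r.2.2.1, r.2.2.2, r.2.1))).foldl
        (fun d q => d.modify q.1 [] (fun g => g ++ [q.2])) d := by
  induction solution generalizing d with
  | nil => simp [bssRows]
  | cons pv rest ih =>
    simp only [bssRows, List.filterMap_cons, List.foldl_cons]
    cases hg : (PySem.Dict.mk levels).get? pv.1 with
    | none => simpa [bssRows, hg] using ih _
    | some lp => simpa [bssRows, hg] using ih _

theorem bss_rows_pkgs_sublist (solution : List (String × String)) (levels : List (String × Int × Int)) :
    ((bssRows solution levels).map (·.2.2.1)).Sublist (solution.map Prod.fst) := by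
  induction solution with
  | nil => simp [bssRows]
  | cons pv rest ih =>
    simp only [bssRows, List.filterMap_cons, List.map_cons]
    cases hg : (PySem.Dict.mk levels).get? pv.1 with
    | none => exact List.Sublist.cons _ (by simpa [bssRows] using ih)
    | some lp =>
      simp only [List.map_cons]
      exact List.Sublist.cons₂ _ (by simpa using ih)

theorem flatMap_perm_of_forall {α β : Type} (L : List α) (f g : α → List β)
    (h : ∀ a ∈ L, (f a).Perm (g a)) : (L.flatMap f).Perm (L.flatMap g) := by
  induction L with
  | nil => simp
  | cons a L ih =>
    simp only [List.flatMap_cons]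
    exact (h a (by simp)).append (ih (fun a ha => h a (by simp [ha])))

theorem flatMap_filter_perm (L : List Int) (xs : List (Int × Int × String × String))
    (hnd : L.Nodup) (hcov : ∀ r ∈ xs, r.1 ∈ L) :
    (L.flatMap (fun l => xs.filter (fun r => r.1 == l))).Perm xs := by
  induction L generalizing xs with
  | nil =>
    have : xs = [] := List.eq_nil_iff_forall_not_mem.2 (fun r hr => by simpa using hcov r hr)
    simp [this]
  | cons l L ih =>
    simp only [List.flatMap_cons]
    have hstep : ∀ l' ∈ L, xs.filter (fun r => r.1 == l')
        = (xs.filter (fun r => !(r.1 == l))).filter (fun r => r.1 == l') := by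
      intro l' hl'
      have hne : l' ≠ l := fun he => (List.nodup_cons.1 hnd).1 (he ▸ hl')
      rw [List.filter_filter]
      refine (List.filter_congr ?_).symm
      intro r _
      by_cases h1 : r.1 = l'
      · simp [h1, hne]
      · simp [h1]
    have hfm : L.flatMap (fun l' => xs.filter (fun r => r.1 == l'))
        = L.flatMap (fun l' => (xs.filter (fun r => !(r.1 == l))).filter (fun r => r.1 == l')) := by
      exact List.flatMap_congr (fun l' hl' => hstep l' hl')
    rw [hfm]
    have ihh := ih (xs.filter (fun r => !(r.1 == l))) (List.nodup_cons.1 hnd).2 ?_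
    · exact (List.Perm.append_left _ ihh).trans (List.filter_append_perm _ xs)
    · intro r hr
      have := List.mem_filter.1 hr
      have h2 := hcov r this.1
      simp only [List.mem_cons] at h2
      rcases h2 with h2 | h2
      · exfalso; simp [h2] at this
      · exact h2

theorem bssCanon_perm (rows : List (Int × Int × String × String)) : (bssCanon rows).Perm rows := by
  unfold bssCanon
  have h1 : ((PySem.List.sorted (PySem.Set.ofList (rows.map (·.1))) (fun x => x)).flatMap
      (fun l => PySem.List.sorted (rows.filter (fun r => r.1 == l)) bssKpp)).Perm
      ((PySem.List.sorted (PySem.Set.ofList (rows.map (·.1))) (fun x => x)).flatMap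
      (fun l => rows.filter (fun r => r.1 == l))) :=
    flatMap_perm_of_forall _ _ _ (fun l _ => PySem.List.sorted_perm _ _ _)
  refine h1.trans (flatMap_filter_perm _ _ ?_ ?_)
  · exact ((PySem.List.sorted_perm (PySem.Set.ofList (rows.map (·.1))) (fun x => x) false).symm.nodup
      (PySem.Set.nodup_ofList _))
  · intro r hr
    rw [PySem.List.mem_sorted, PySem.Set.mem_ofList]
    exact List.mem_map.2 ⟨r, hr, rfl⟩

theorem bssCanon_pairwise (rows : List (Int × Int × String × String))
    (hnd : (rows.map (·.2.2.1)).Nodup) :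
    (bssCanon rows).Pairwise (fun a b => bssKfull a < bssKfull b) := by
  unfold bssCanon
  rw [List.pairwise_flatMap]
  constructor
  · intro l hl
    -- within a level block
    have hmem : ∀ x ∈ PySem.List.sorted (rows.filter (fun r => r.1 == l)) bssKpp, x.1 = l := by
      intro x hx
      rw [PySem.List.mem_sorted] at hx
      simpa using (List.mem_filter.1 hx).2
    have hle : (PySem.List.sorted (rows.filter (fun r => r.1 == l)) bssKpp).Pairwise
        (fun a b => bssKpp a ≤ bssKpp b) := PySem.List.sorted_pairwise _ _
    have hblocknd : ((PySem.List.sorted (rows.filter (fun r => r.1 == l)) bssKpp).map (·.2.2.1)).Nodup := by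
      have hsub : ((rows.filter (fun r => r.1 == l)).map (·.2.2.1)).Sublist (rows.map (·.2.2.1)) :=
        List.Sublist.map _ (List.filter_sublist)
      have hperm : ((rows.filter (fun r => r.1 == l)).map (·.2.2.1)).Perm
          ((PySem.List.sorted (rows.filter (fun r => r.1 == l)) bssKpp).map (·.2.2.1)) :=
        ((PySem.List.sorted_perm (rows.filter (fun r => r.1 == l)) bssKpp false).symm.map _)
      exact hperm.nodup (hsub.nodup hnd)
    have hne : (PySem.List.sorted (rows.filter (fun r => r.1 == l)) bssKpp).Pairwise
        (fun a b => a.2.2.1 ≠ b.2.2.1) := by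
      exact List.pairwise_map.1 hblocknd
    refine (hle.and hne).imp_of_mem ?_
    intro a b ha hb hab
    have hlt : bssKpp a < bssKpp b := by
      refine lt_of_le_of_ne hab.1 (fun he => hab.2 ?_)
      have := congrArg (fun x : Int ×ₗ String => (ofLex x).2) he
      simpa [bssKpp] using this
    have h1 : a.1 = l := hmem a ha
    have h2 : b.1 = l := hmem b hb
    unfold bssKfull
    rw [Prod.Lex.toLex_lt_toLex]
    right
    exact ⟨by rw [h1, h2], by simpa [bssKpp] using hlt⟩
  · -- across blocks
    have hplt : (PySem.List.sorted (PySem.Set.ofList (rows.map (·.1))) (fun x => x)).Pairwise (· < ·) :=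
      PySem.List.sorted_ofList_pairwise_lt _
    refine hplt.imp ?_
    intro l₁ l₂ hlt x hx y hy
    rw [PySem.List.mem_sorted] at hx hy
    have h1 : x.1 = l₁ := by simpa using (List.mem_filter.1 hx).2
    have h2 : y.1 = l₂ := by simpa using (List.mem_filter.1 hy).2
    unfold bssKfull
    rw [Prod.Lex.toLex_lt_toLex]
    left
    rw [h1, h2]; exact hlt

theorem bss_sorted_eq_canon (rows : List (Int × Int × String × String))
    (hnd : (rows.map (·.2.2.1)).Nodup) :
    PySem.List.sorted rows bssKfull = bssCanon rows :=
  PySem.List.sorted_eq_of_perm_of_pairwise_lt _ _ _ (bssCanon_perm rows) (bssCanon_pairwise rows hnd)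

theorem bss_keys (M : List (Int × (String × String × Int))) (d : PySem.Dict Int (List (String × String × Int))) :
    (M.foldl (fun d q => d.modify q.1 [] (fun g => g ++ [q.2])) d).keys
    = PySem.Set.update d.keys (M.map (·.1)) :=
  PySem.Dict.keys_foldl_modify_key M (fun q => q.1) [] (fun _ q g => g ++ [q.2]) d

theorem bss_getD (M : List (Int × (String × String × Int))) (l : Int) :
    (M.foldl (fun d q => d.modify q.1 [] (fun g => g ++ [q.2])) PySem.Dict.empty).getD l []
    = (M.filter (fun p => p.1 == l)).map (·.2) := by
  have := PySem.Dict.getD_foldl_modify_append M PySem.Dict.empty l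
  simpa using this

theorem bss_main (solution : List (String × String)) (levels : List (String × Int × Int))
    (hnd : (solution.map Prod.fst).Nodup) :
    build_sort_solution solution levels = build_sort_solution_alt solution levels := by
  have hrows_nd : ((bssRows solution levels).map (·.2.2.1)).Nodup :=
    (bss_rows_pkgs_sublist solution levels).nodup hnd
  unfold build_sort_solution build_sort_solution_alt
  simp only [bss_group_fold_eq levels solution PySem.Dict.empty]
  set R := bssRows solution levels with hR
  set M := R.map (fun r => (r.1, r.2.2.1, r.2.2.2, r.2.1)) with hM
  congr 1
  -- keys
  have hkeys : (M.foldl (fun d q => d.modify q.1 [] (fun g => g ++ [q.2])) PySem.Dict.empty).keys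
      = PySem.Set.ofList (R.map (·.1)) := by
    rw [bss_keys, PySem.Dict.keys_empty, PySem.Set.update_nil_left, hM, List.map_map]
    rfl
  rw [hkeys, PySem.List.foldl_append_eq_flatMap, List.nil_append]
  -- per-level blocks
  have hblock : ∀ l : Int,
      (PySem.List.sorted2 ((M.foldl (fun d q => d.modify q.1 [] (fun g => g ++ [q.2])) PySem.Dict.empty).getD l [])
        (fun x => x.2.2) (fun x => x.1)).map (fun x => (x.1, x.2.1))
      = (PySem.List.sorted (R.filter (fun r => r.1 == l)) bssKpp).map (fun r => (r.2.2.1, r.2.2.2)) := by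
    intro l
    rw [bss_getD, sorted2_eq_sorted_toLex]
    have hGl : (M.filter (fun p => p.1 == l)).map (·.2)
        = (R.filter (fun r => r.1 == l)).map (fun r => (r.2.2.1, r.2.2.2, r.2.1)) := by
      rw [hM, List.filter_map, List.map_map]
      rfl
    rw [hGl, sorted_map_comm, List.map_map]
    rfl
  have hflat : (PySem.List.sorted (PySem.Set.ofList (R.map (·.1))) (fun x => x)).flatMap
      (fun l => (PySem.List.sorted2 ((M.foldl (fun d q => d.modify q.1 [] (fun g => g ++ [q.2])) PySem.Dict.empty).getD l [])
        (fun x => x.2.2) (fun x => x.1)).map (fun x => (x.1, x.2.1)))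
      = (bssCanon R).map (fun r => (r.2.2.1, r.2.2.2)) := by
    rw [List.flatMap_congr (fun l _ => hblock l)]
    rw [bssCanon, ← List.map_flatMap]
  rw [hflat, ← bss_sorted_eq_canon R hrows_nd]
  rfl

-- ===== VERDICT (by name: the statement is the Claim_ definition above) =====
theorem build_sort_solution_spec : Claim_equal_build_sort_solution := by
  intro solution levels _ hpre
  unfold Spec_build_sort_solution
  exact bss_main solution levels hpre.1
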